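-- pv_equiv track=rewrite | github.com/CarlosHernandezP/LookAtMe_shot_detection | shot_detector/shot_mapper.py | map_shot_to_class
-- ===== SOURCE A (Python) =====
-- from typing import Dict, List, Optional, Set
--
-- DEFAULT_SHOT_MAPPING: Dict[str, List[str]] = {
--     "forehand": [
--         "forehand",
--         "lob",
--         "forehand_wall_exit",
--         "wall_lob",
--     ],
--     "backhand": [
--         "backhand",
--         "backhand_wall_exit",
--     ],
--     "serve": ["serve"],
--     "smash": [
--         "flat_smash",
--         "topspin_smash",
--         "smash",
--         "bajada",
--     ],
--     "volley": [
--         "backhand_volley",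
--         "forehand_volley",
--         "drop_shot",
--     ],
--     "bandeja": ["bandeja"],
--     "vibora": ["vibora"],
--     "idle": ["idle"],
--     "wall_shot": ["forehand_contrapared"],
-- }
--
-- def map_shot_to_class(shot_type: str, mapping: Optional[Dict[str, List[str]]] = None) -> Optional[str]:
--     if mapping is None:
--         mapping = DEFAULT_SHOT_MAPPING
--
--     if shot_type is None or str(shot_type).strip().lower() == "shot":
--         return None
--
--     shot_type = str(shot_type).strip().lower()
--
--     for class_name, shot_list in mapping.items():
--         if shot_type in [s.lower() for s in shot_list]:
--             return class_name
--
--     return None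
-- ===== SOURCE B (Python) =====
-- from typing import Dict, List, Optional
--
-- DEFAULT_SHOT_MAPPING: Dict[str, List[str]] = {
--     "forehand": ["forehand", "lob", "forehand_wall_exit", "wall_lob"],
--     "backhand": ["backhand", "backhand_wall_exit"],
--     "serve": ["serve"],
--     "smash": ["flat_smash", "topspin_smash", "smash", "bajada"],
--     "volley": ["backhand_volley", "forehand_volley", "drop_shot"],
--     "bandeja": ["bandeja"],
--     "vibora": ["vibora"],
--     "idle": ["idle"],
--     "wall_shot": ["forehand_contrapared"],
-- }
--
-- def map_shot_to_class(shot_type: str, mapping: Optional[Dict[str, List[str]]] = None) -> Optional[str]: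
--     if mapping is None:
--         mapping = DEFAULT_SHOT_MAPPING
--
--     if shot_type is None or str(shot_type).strip().lower() == "shot":
--         return None
--
--     shot_type = str(shot_type).strip().lower()
--
--     inverted: Dict[str, str] = {}
--     for class_name, shot_list in mapping.items():
--         for s in shot_list:
--             inverted.setdefault(s.lower(), class_name)
--
--     return inverted.get(shot_type)
-- ===== Notes on version B (the rewrite author's own statement) =====
-- stated objective: alternative
-- what changed: B builds a shot->class inverted index once (setdefault, so the first class wins on duplicate shots) and answers with a single dict lookup, instead of A's scan over classes that lowercases each shot list and tests membership per class.
import Mathlib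
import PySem

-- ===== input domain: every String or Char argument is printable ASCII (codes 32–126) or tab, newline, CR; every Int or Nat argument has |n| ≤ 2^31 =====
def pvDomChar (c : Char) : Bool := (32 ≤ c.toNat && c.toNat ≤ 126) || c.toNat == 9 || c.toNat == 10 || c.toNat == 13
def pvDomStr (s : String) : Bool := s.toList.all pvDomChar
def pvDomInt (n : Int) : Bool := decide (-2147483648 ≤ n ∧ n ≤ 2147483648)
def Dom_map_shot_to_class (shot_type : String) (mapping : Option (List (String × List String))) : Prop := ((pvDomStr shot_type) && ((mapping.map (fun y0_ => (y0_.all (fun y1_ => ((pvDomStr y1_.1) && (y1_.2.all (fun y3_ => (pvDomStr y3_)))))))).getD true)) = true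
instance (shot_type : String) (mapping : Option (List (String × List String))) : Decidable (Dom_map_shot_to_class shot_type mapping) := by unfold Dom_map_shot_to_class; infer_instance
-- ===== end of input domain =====

-- B builds a shot->class inverted index once (setdefault: first class wins) and answers by one
-- dict lookup, instead of A's per-class scan that lowercases each shot list and tests membership.

-- shared module-level constant (DEFAULT_SHOT_MAPPING)
def pvDefaultMapping : List (String × List String) :=
  [("forehand", ["forehand", "lob", "forehand_wall_exit", "wall_lob"]),
   ("backhand", ["backhand", "backhand_wall_exit"]),
   ("serve", ["serve"]),
   ("smash", ["flat_smash", "topspin_smash", "smash", "bajada"]),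
   ("volley", ["backhand_volley", "forehand_volley", "drop_shot"]),
   ("bandeja", ["bandeja"]),
   ("vibora", ["vibora"]),
   ("idle", ["idle"]),
   ("wall_shot", ["forehand_contrapared"])]

-- ===== PORT A =====
-- A's for-loop over mapping.items(): first class whose lowercased shot list contains the shot
def pvScanA (st : String) : List (String × List String) → Option String
  | [] => none
  | (c, sl) :: rest => if (sl.map PySem.Str.lower).contains st then some c else pvScanA st rest

def map_shot_to_class (shot_type : String) (mapping : Option (List (String × List String))) : Option String :=
  let m := mapping.getD pvDefaultMapping
  if PySem.Str.lower (PySem.Str.strip shot_type) = "shot" then none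
  else pvScanA (PySem.Str.lower (PySem.Str.strip shot_type)) m

-- ===== PORT B =====
-- B's inverted index: setdefault so the FIRST class seen for a shot wins
def pvBuildInv (m : List (String × List String)) : PySem.Dict String String :=
  m.foldl (fun d p => p.2.foldl (fun d s => d.setdefault (PySem.Str.lower s) p.1) d) PySem.Dict.empty

def map_shot_to_class_alt (shot_type : String) (mapping : Option (List (String × List String))) : Option String :=
  let m := mapping.getD pvDefaultMapping
  if PySem.Str.lower (PySem.Str.strip shot_type) = "shot" then none
  else (pvBuildInv m).get? (PySem.Str.lower (PySem.Str.strip shot_type))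

-- ===== PRECONDITION & SPEC =====
def Spec_map_shot_to_class (shot_type : String) (mapping : Option (List (String × List String))) (out : Option String) : Prop := out = map_shot_to_class_alt shot_type mapping
instance (shot_type : String) (mapping : Option (List (String × List String))) (out : Option String) : Decidable (Spec_map_shot_to_class shot_type mapping out) := by unfold Spec_map_shot_to_class; infer_instance

-- ===== CLAIM (what is proved, stated in full; the proofs are below) =====
def Claim_equal_map_shot_to_class : Prop := ∀ (shot_type : String) (mapping : Option (List (String × List String))), Dom_map_shot_to_class shot_type mapping → Spec_map_shot_to_class shot_type mapping (map_shot_to_class shot_type mapping)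

-- ===== LEMMAS AND PROOFS =====

theorem pv_setdefault_eq (d : PySem.Dict String String) (k v : String) :
    d.setdefault k v = if d.contains k then d else d.insert k v := by
  simp only [PySem.Dict.setdefault, PySem.Dict.insert]
  split <;> simp_all

theorem pv_inner (c st : String) (sl : List String) (d : PySem.Dict String String) :
    ((sl.foldl (fun d s => d.setdefault (PySem.Str.lower s) c) d).get? st)
      = (d.get? st).or (if (sl.map PySem.Str.lower).contains st then some c else none) := by
  induction sl generalizing d with
  | nil => simp
  | cons s rest ih =>
    rw [List.foldl_cons, ih, pv_setdefault_eq]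
    by_cases he : st = PySem.Str.lower s
    · rw [← he]
      by_cases hc : d.contains st
      · obtain ⟨v, hv⟩ : ∃ v, d.get? st = some v := by
          rw [PySem.Dict.contains_eq_isSome_get?] at hc
          rcases h : d.get? st with _ | v
          · rw [h] at hc; simp at hc
          · exact ⟨v, rfl⟩
        simp [hc, hv]
      · have hn : d.get? st = none := by
          rw [PySem.Dict.contains_eq_isSome_get?] at hc
          rcases h : d.get? st with _ | v
          · rfl
          · rw [h] at hc; simp at hc
        rw [if_neg hc]
        rw [he] at hn
        simp [hn, he, PySem.Dict.get?_insert_self]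
    · by_cases hc : d.contains (PySem.Str.lower s)
      · rw [if_pos hc]
        simp [he]
      · rw [if_neg hc]
        simp [he, PySem.Dict.get?_insert_of_ne _ _ he]

theorem pv_outer (st : String) (m : List (String × List String)) (d : PySem.Dict String String) :
    ((m.foldl (fun d p => p.2.foldl (fun d s => d.setdefault (PySem.Str.lower s) p.1) d) d).get? st)
      = (d.get? st).or (pvScanA st m) := by
  induction m generalizing d with
  | nil => simp [pvScanA]
  | cons p rest ih =>
    rw [List.foldl_cons, ih, pv_inner]
    rcases h : d.get? st with _ | v <;> simp [pvScanA] <;> (try split) <;> simp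

theorem pv_build_eq (st : String) (m : List (String × List String)) :
    (pvBuildInv m).get? st = pvScanA st m := by
  rw [pvBuildInv, pv_outer]
  simp [PySem.Dict.get?_empty]

-- ===== VERDICT (by name: the statement is the Claim_ definition above) =====
theorem map_shot_to_class_spec : Claim_equal_map_shot_to_class := by
  intro st mapping _
  unfold Spec_map_shot_to_class map_shot_to_class map_shot_to_class_alt
  split
  · rfl
  · exact (pv_build_eq _ _).symm
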